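-- pv_equiv track=rewrite | github.com/GAIMHE/visu_streamlit | apps/pages/2_objective_activity_matrix.py | _dedupe_labels
-- ===== SOURCE A (Python) =====
-- def _dedupe_labels(labels: list[str]) -> list[str]:
--     counts: dict[str, int] = {}
--     output: list[str] = []
--     for label in labels:
--         counts[label] = counts.get(label, 0) + 1
--         if counts[label] == 1:
--             output.append(label)
--         else:
--             output.append(f"{label} #{counts[label]}")
--     return output
-- ===== SOURCE B (Python) =====
-- def _dedupe_labels(labels: list[str]) -> list[str]:
--     # Two-phase: bucket the indices of each label, then write each entry into
--     # a preallocated output slot by its rank within its bucket.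
--     buckets: dict[str, list[int]] = {}
--     for i, label in enumerate(labels):
--         buckets[label] = buckets.get(label, []) + [i]
--     out = [""] * len(labels)
--     for label, idxs in buckets.items():
--         for rank, i in enumerate(idxs):
--             out[i] = label if rank == 0 else f"{label} #{rank + 1}"
--     return out
-- ===== Notes on version B (the rewrite author's own statement) =====
-- stated objective: alternative
-- what changed: Replaces the single forward pass with a running counter by a two-phase group-and-scatter scheme: one pass buckets the occurrence indices of each label, then the output is written slot-by-slot from each bucket's ranks into a preallocated list.
import Mathlib
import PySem

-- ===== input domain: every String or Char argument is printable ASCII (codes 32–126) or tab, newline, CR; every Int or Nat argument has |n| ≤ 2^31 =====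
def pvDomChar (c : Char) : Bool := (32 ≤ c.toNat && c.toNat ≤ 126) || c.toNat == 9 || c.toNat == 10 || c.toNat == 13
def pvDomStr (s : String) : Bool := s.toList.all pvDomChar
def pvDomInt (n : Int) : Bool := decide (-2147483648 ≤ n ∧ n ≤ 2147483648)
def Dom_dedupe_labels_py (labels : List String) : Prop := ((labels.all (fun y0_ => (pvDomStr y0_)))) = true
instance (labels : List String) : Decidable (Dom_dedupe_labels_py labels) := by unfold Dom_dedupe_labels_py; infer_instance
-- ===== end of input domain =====

-- B replaces A's single forward pass with a running counter by a two-phase group-and-scatter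
-- scheme: bucket the occurrence indices of each label, then write each slot of a preallocated
-- output from its bucket rank (alternative decomposition, no speed claim).


-- ===== PORT A =====
-- counts[label] = counts.get(label, 0) + 1; append label or f"{label} #{counts[label]}"
def dedupe_labels_py (labels : List String) : List String :=
  (labels.foldl
    (fun (st : PySem.Dict String Int × List String) label =>
      let counts := st.1.insert label (st.1.getD label 0 + 1)
      let c := counts.getD label 0
      if c = 1 then (counts, st.2 ++ [label])
      else (counts, st.2 ++ [label ++ " #" ++ PySem.Int.toStr c]))
    (PySem.Dict.empty, [])).2

-- ===== PORT B =====
-- phase 1: buckets[label] = buckets.get(label, []) + [i] over enumerate(labels)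
-- phase 2: out = [""] * len(labels); for label, idxs in buckets.items(): for rank, i in
--          enumerate(idxs): out[i] = label if rank == 0 else f"{label} #{rank + 1}"
def dedupe_labels_py_alt (labels : List String) : List String :=
  let buckets := (PySem.List.enumerate labels 0).foldl
    (fun (d : PySem.Dict String (List Int)) p => d.insert p.2 (d.getD p.2 [] ++ [p.1]))
    PySem.Dict.empty
  let out0 := PySem.List.pyRepeat [""] (labels.length : Int)
  buckets.items.foldl
    (fun (out : List String) pr =>
      (PySem.List.enumerate pr.2 0).foldl
        (fun (out : List String) q =>
          PySem.List.pySetD out q.2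
            (if q.1 = 0 then pr.1 else pr.1 ++ " #" ++ PySem.Int.toStr (q.1 + 1)))
        out)
    out0

-- ===== PRECONDITION & SPEC =====
def Spec_dedupe_labels_py (labels : List String) (out : List String) : Prop := out = dedupe_labels_py_alt labels
instance (labels : List String) (out : List String) : Decidable (Spec_dedupe_labels_py labels out) := by unfold Spec_dedupe_labels_py; infer_instance

-- ===== CLAIM (what is proved, stated in full; the proofs are below) =====
def Claim_equal_dedupe_labels_py : Prop := ∀ (labels : List String), Dom_dedupe_labels_py labels → Spec_dedupe_labels_py labels (dedupe_labels_py labels)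

-- ===== LEMMAS AND PROOFS =====

-- the common reference value: entry i of the result, from the count of labels[i] in labels[:i]
def tagVal (labels : List String) (i : Nat) (x : String) : String :=
  if (labels.take i).count x = 0 then x
  else x ++ " #" ++ PySem.Int.toStr (((labels.take i).count x : Int) + 1)

def tgt (labels : List String) : List String := labels.mapIdx (fun i x => tagVal labels i x)

-- the (ascending) list of positions of x in l
def natOcc (l : List String) (x : String) : List Nat :=
  match l with
  | [] => []
  | y :: t => (if y = x then [0] else []) ++ (natOcc t x).map (· + 1)

def applyWrites (ws : List (Int × String)) (o : List String) : List String :=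
  ws.foldl (fun o w => PySem.List.pySetD o w.1 w.2) o

def wlist (x : String) (idxs : List Int) : List (Int × String) :=
  (PySem.List.enumerate idxs 0).map
    (fun q => (q.2, if q.1 = 0 then x else x ++ " #" ++ PySem.Int.toStr (q.1 + 1)))

def writes (labels : List String) : List (Int × String) :=
  (PySem.Set.ofList labels).flatMap
    (fun x => wlist x ((natOcc labels x).map (fun (k : Nat) => (k : Int))))

-- ---- A = tgt ----

theorem fst_fold_eq (l : List String) (d : PySem.Dict String Int) (out : List String) :
    (l.foldl
      (fun (st : PySem.Dict String Int × List String) label =>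
        let counts := st.1.insert label (st.1.getD label 0 + 1)
        let c := counts.getD label 0
        if c = 1 then (counts, st.2 ++ [label])
        else (counts, st.2 ++ [label ++ " #" ++ PySem.Int.toStr c]))
      (d, out)).1
    = l.foldl (fun d x => d.insert x (d.getD x 0 + 1)) d := by
  induction l generalizing d out with
  | nil => rfl
  | cons x l ih =>
    simp only [List.foldl_cons]
    split_ifs <;> exact ih _ _

theorem a_eq_tgt (l : List String) : dedupe_labels_py l = tgt l := by
  induction l using List.reverseRecOn with
  | nil => rfl
  | append_singleton l x ih =>
    have hA : dedupe_labels_py (l ++ [x])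
        = dedupe_labels_py l
          ++ [if ((l.count x : Int) + 1) = 1 then x
              else x ++ " #" ++ PySem.Int.toStr ((l.count x : Int) + 1)] := by
      unfold dedupe_labels_py
      rw [List.foldl_append, List.foldl_cons, List.foldl_nil]
      have hc : ((List.foldl
          (fun (st : PySem.Dict String Int × List String) label =>
            let counts := st.1.insert label (st.1.getD label 0 + 1)
            let c := counts.getD label 0
            if c = 1 then (counts, st.2 ++ [label])
            else (counts, st.2 ++ [label ++ " #" ++ PySem.Int.toStr c]))
          (PySem.Dict.empty, []) l).1.insert x
            ((List.foldl
          (fun (st : PySem.Dict String Int × List String) label =>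
            let counts := st.1.insert label (st.1.getD label 0 + 1)
            let c := counts.getD label 0
            if c = 1 then (counts, st.2 ++ [label])
            else (counts, st.2 ++ [label ++ " #" ++ PySem.Int.toStr c]))
          (PySem.Dict.empty, []) l).1.getD x 0 + 1)).getD x 0
          = (l.count x : Int) + 1 := by
        rw [PySem.Dict.getD_insert_self, fst_fold_eq,
          PySem.Dict.getD_foldl_insert_add_one]
        simp [PySem.Dict.getD_empty]
      simp only [hc]
      split_ifs <;> rfl
    have hB : tgt (l ++ [x]) = tgt l ++ [tagVal (l ++ [x]) l.length x] := by
      rw [tgt, List.mapIdx_concat]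
      congr 1
      apply List.ext_getElem?
      intro i
      rw [List.getElem?_mapIdx, tgt, List.getElem?_mapIdx]
      cases h : l[i]? with
      | none => rfl
      | some y =>
        have hi : i < l.length := by
          by_contra hcon
          rw [List.getElem?_eq_none (by omega)] at h
          cases h
        simp only [Option.map_some, Option.some.injEq]
        unfold tagVal
        rw [List.take_append_of_le_length (le_of_lt hi)]
    have htag : tagVal (l ++ [x]) l.length x
        = if l.count x = 0 then x
          else x ++ " #" ++ PySem.Int.toStr ((l.count x : Int) + 1) := by
      unfold tagVal
      rw [List.take_left]
    rw [hA, hB, ih, htag]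
    congr 1
    rcases Nat.eq_zero_or_pos (l.count x) with h0 | hpos
    · simp [h0]
    · have hne1 : ((l.count x : Int) + 1) ≠ 1 := by omega
      have hne2 : l.count x ≠ 0 := by omega
      rw [if_neg hne1, if_neg hne2]

-- ---- bucket characterisation ----

theorem getD_bfold (ps : List (Int × String)) (x : String) :
    ∀ (d : PySem.Dict String (List Int)),
    (ps.foldl (fun d p => d.insert p.2 (d.getD p.2 [] ++ [p.1])) d).getD x []
    = d.getD x [] ++ (ps.filter (fun p => p.2 == x)).map (·.1) := by
  induction ps with
  | nil => intro d; simp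
  | cons p t ih =>
    intro d
    simp only [List.foldl_cons, List.filter_cons]
    rw [ih]
    by_cases hp : p.2 = x
    · simp [PySem.Dict.getD_insert, hp]
    · simp [PySem.Dict.getD_insert, hp, Ne.symm hp]

theorem filter_enum (l : List String) (x : String) :
    ∀ (s : Int),
    ((PySem.List.enumerate l s).filter (fun p => p.2 == x)).map (·.1)
    = (natOcc l x).map (fun (k : Nat) => s + (k : Int)) := by
  induction l with
  | nil => intro s; simp [natOcc, PySem.List.enumerate_nil]
  | cons y t ih =>
    intro s
    rw [PySem.List.enumerate_cons, List.filter_cons]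
    by_cases hy : y = x
    · rw [if_pos (by simp [hy]), List.map_cons]
      have hocc : natOcc (y :: t) x = 0 :: (natOcc t x).map (· + 1) := by
        simp [natOcc, hy]
      rw [hocc, List.map_cons, ih (s + 1), List.map_map]
      congr 1
      · simp
      · apply List.map_congr_left
        intro k _
        simp only [Function.comp_apply]
        push_cast
        ring
    · rw [if_neg (by simp [hy])]
      have hocc : natOcc (y :: t) x = (natOcc t x).map (· + 1) := by
        simp [natOcc, hy]
      rw [hocc, ih (s + 1), List.map_map]
      apply List.map_congr_left
      intro k _
      simp only [Function.comp_apply]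
      push_cast
      ring

-- ---- natOcc facts ----

theorem natOcc_idx (l : List String) (x : String) :
    ∀ (r k : Nat), (natOcc l x)[r]? = some k →
      ∃ h : k < l.length, l[k] = x ∧ (l.take k).count x = r := by
  induction l with
  | nil => intro r k h; simp [natOcc] at h
  | cons y t ih =>
    intro r k h
    by_cases hy : y = x
    · rw [show natOcc (y :: t) x = 0 :: (natOcc t x).map (· + 1) from by simp [natOcc, hy]] at h
      match r with
      | 0 =>
        simp only [List.getElem?_cons_zero, Option.some.injEq] at h
        subst h
        exact ⟨Nat.succ_pos _, by simpa using hy, by simp⟩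
      | r + 1 =>
        simp only [List.getElem?_cons_succ, List.getElem?_map] at h
        obtain ⟨k', hk', rfl⟩ := Option.map_eq_some_iff.mp h
        obtain ⟨hlt, hx, hc⟩ := ih r k' hk'
        refine ⟨by simpa using Nat.succ_lt_succ hlt, by simpa using hx, ?_⟩
        simp [List.take_succ_cons, List.count_cons, hc, hy]
    · rw [show natOcc (y :: t) x = (natOcc t x).map (· + 1) from by simp [natOcc, hy],
        List.getElem?_map] at h
      obtain ⟨k', hk', rfl⟩ := Option.map_eq_some_iff.mp h
      obtain ⟨hlt, hx, hc⟩ := ih r k' hk'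
      refine ⟨by simpa using Nat.succ_lt_succ hlt, by simpa using hx, ?_⟩
      simp [List.take_succ_cons, List.count_cons, hc, hy]

theorem natOcc_get (l : List String) (x : String) :
    ∀ (k : Nat) (h : k < l.length), l[k] = x →
      (natOcc l x)[(l.take k).count x]? = some k := by
  induction l with
  | nil => intro k h; simp at h
  | cons y t ih =>
    intro k hk hx
    match k with
    | 0 =>
      have : y = x := by simpa using hx
      simp [natOcc, this]
    | k + 1 =>
      have hk' : k < t.length := by simpa using hk
      have hx' : t[k] = x := by simpa using hx
      by_cases hy : y = x
      · simp only [natOcc, if_pos hy, List.singleton_append, List.take_succ_cons]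
        have hcnt : List.count x (y :: List.take k t) = List.count x (List.take k t) + 1 := by
          simp [List.count_cons, hy]
        rw [hcnt, List.getElem?_cons_succ, List.getElem?_map, ih k hk' hx']
        rfl
      · simp only [natOcc, if_neg hy, List.nil_append, List.take_succ_cons]
        have hcnt : List.count x (y :: List.take k t) = List.count x (List.take k t) := by
          simp [List.count_cons, hy]
        rw [hcnt, List.getElem?_map, ih k hk' hx']
        rfl

theorem natOcc_mem (l : List String) (x : String) (k : Nat) (h : k ∈ natOcc l x) :
    ∃ hk : k < l.length, l[k] = x := by
  obtain ⟨r, hr⟩ := List.mem_iff_getElem?.mp h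
  obtain ⟨hk, hx, -⟩ := natOcc_idx l x r k hr
  exact ⟨hk, hx⟩

theorem natOcc_sorted (l : List String) (x : String) : (natOcc l x).Pairwise (· < ·) := by
  induction l with
  | nil => simp [natOcc]
  | cons y t ih =>
    simp only [natOcc, List.pairwise_append, List.pairwise_map]
    refine ⟨by split <;> simp, ih.imp (by omega), ?_⟩
    intro a ha b hb
    simp only [List.mem_map] at hb
    obtain ⟨k, -, rfl⟩ := hb
    have : a = 0 := by split at ha <;> simp_all
    omega

-- ---- write machinery ----

theorem applyWrites_length (ws : List (Int × String)) :
    ∀ (o : List String), (applyWrites ws o).length = o.length := by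
  induction ws with
  | nil => intro o; rfl
  | cons w t ih =>
    intro o
    simp only [applyWrites, List.foldl_cons] at *
    rw [ih, PySem.List.length_pySetD]

theorem foldl_applyWrites (K : List String) (f : String → List (Int × String)) :
    ∀ (o : List String),
    K.foldl (fun o x => applyWrites (f x) o) o = applyWrites (K.flatMap f) o := by
  induction K with
  | nil => intro o; rfl
  | cons k t ih =>
    intro o
    simp only [List.foldl_cons, List.flatMap_cons, applyWrites, List.foldl_append]
    exact ih _

theorem applyWrites_notmem (ws : List (Int × String)) :
    ∀ (o : List String) (j : Nat),
    (∀ w ∈ ws, ∃ k : Nat, w.1 = (k : Int) ∧ k ≠ j) →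
    (applyWrites ws o)[j]? = o[j]? := by
  induction ws with
  | nil => intro o j _; rfl
  | cons w t ih =>
    intro o j h
    obtain ⟨k, hk, hne⟩ := h w (List.mem_cons_self)
    simp only [applyWrites, List.foldl_cons] at *
    rw [ih _ j (fun w hw => h w (List.mem_cons_of_mem _ hw)), hk,
      PySem.List.pySetD_natCast, List.getElem?_set_ne hne]

theorem applyWrites_mem (ws : List (Int × String)) :
    ∀ (o : List String) (j : Nat) (v : String),
    (ws.map (·.1)).Nodup →
    (∀ w ∈ ws, ∃ k : Nat, w.1 = (k : Int)) →
    ((j : Int), v) ∈ ws → j < o.length →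
    (applyWrites ws o)[j]? = some v := by
  induction ws with
  | nil => intro o j v _ _ hmem _; simp at hmem
  | cons w t ih =>
    intro o j v hnd hnat hmem hlen
    simp only [List.map_cons, List.nodup_cons] at hnd
    obtain ⟨hw1, hndt⟩ := hnd
    rcases List.mem_cons.mp hmem with hw | hmem'
    · subst hw
      rw [show applyWrites (((j : Int), v) :: t) o
          = applyWrites t (PySem.List.pySetD o ((j : Int)) v) from rfl]
      rw [applyWrites_notmem, PySem.List.pySetD_natCast]
      · exact List.getElem?_set_self hlen
      · intro w' hw'
        obtain ⟨k, hk⟩ := hnat w' (List.mem_cons_of_mem _ hw')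
        refine ⟨k, hk, fun hkj => hw1 ?_⟩
        have : ((j : Nat) : Int) ∈ t.map (·.1) := by
          rw [← hkj, ← hk]
          exact List.mem_map_of_mem hw'
        exact this
    · rw [show applyWrites (w :: t) o = applyWrites t (PySem.List.pySetD o w.1 w.2) from rfl]
      apply ih _ j v hndt (fun w' hw' => hnat w' (List.mem_cons_of_mem _ hw')) hmem'
      rw [PySem.List.length_pySetD]
      exact hlen

-- ---- B as applyWrites ----

theorem alt_eq_applyWrites (labels : List String) :
    dedupe_labels_py_alt labels
    = applyWrites (writes labels) (PySem.List.pyRepeat [""] (labels.length : Int)) := by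
  have hnd : ((PySem.List.enumerate labels 0).foldl
      (fun (d : PySem.Dict String (List Int)) p => d.insert p.2 (d.getD p.2 [] ++ [p.1]))
      PySem.Dict.empty).keys.Nodup :=
    PySem.Dict.nodup_keys_foldl_insert_key (PySem.List.enumerate labels 0)
      (fun (p : Int × String) => p.2)
      (fun d p => d.getD p.2 [] ++ [p.1]) PySem.Dict.empty PySem.Dict.nodup_keys_empty
  have hkeys : ((PySem.List.enumerate labels 0).foldl
      (fun (d : PySem.Dict String (List Int)) p => d.insert p.2 (d.getD p.2 [] ++ [p.1]))
      PySem.Dict.empty).keys = PySem.Set.ofList labels := by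
    rw [PySem.Dict.keys_foldl_insert_key, PySem.List.map_snd_enumerate,
      PySem.Dict.keys_empty, PySem.Set.update_nil_left]
  have hget : ∀ x : String, ((PySem.List.enumerate labels 0).foldl
      (fun (d : PySem.Dict String (List Int)) p => d.insert p.2 (d.getD p.2 [] ++ [p.1]))
      PySem.Dict.empty).getD x []
      = (natOcc labels x).map (fun (k : Nat) => (k : Int)) := by
    intro x
    rw [getD_bfold (PySem.List.enumerate labels 0) x PySem.Dict.empty,
      PySem.Dict.getD_empty, List.nil_append, filter_enum labels x 0]
    apply List.map_congr_left
    intro k _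
    omega
  unfold dedupe_labels_py_alt
  show (List.foldl
      (fun (out : List String) pr =>
        List.foldl
          (fun (out : List String) q => PySem.List.pySetD out q.2
            (if q.1 = 0 then pr.1 else pr.1 ++ " #" ++ PySem.Int.toStr (q.1 + 1)))
          out (PySem.List.enumerate pr.2 0))
      (PySem.List.pyRepeat [""] (labels.length : Int))
      ((List.foldl (fun (d : PySem.Dict String (List Int)) p =>
          d.insert p.2 (d.getD p.2 [] ++ [p.1])) PySem.Dict.empty
        (PySem.List.enumerate labels 0)).items))
    = applyWrites (writes labels) (PySem.List.pyRepeat [""] (labels.length : Int))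
  rw [PySem.Dict.items_eq_map_keys _ hnd [], hkeys, List.foldl_map]
  rw [PySem.List.foldl_congr_mem _ _
      (fun (out : List String) (x : String) =>
        applyWrites (wlist x ((natOcc labels x).map (fun (k : Nat) => (k : Int)))) out) _
      (by
        intro out x _
        rw [hget x]
        simp only [wlist, applyWrites]
        rw [List.foldl_map])]
  rw [foldl_applyWrites]
  rfl

theorem writes_pos (labels : List String) :
    (writes labels).map (·.1)
    = (PySem.Set.ofList labels).flatMap (fun x => (natOcc labels x).map (fun (k : Nat) => (k : Int))) := by
  have hfst : ∀ (x : String) (idxs : List Int), (wlist x idxs).map (·.1) = idxs := by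
    intro x idxs
    simp [wlist, List.map_map, Function.comp_def, PySem.List.map_snd_enumerate]
  simp only [writes, List.map_flatMap, hfst]

theorem writes_pos_nodup (labels : List String) : ((writes labels).map (·.1)).Nodup := by
  rw [writes_pos, List.nodup_flatMap]
  constructor
  · intro x _
    apply List.Nodup.map (fun a b h => by exact_mod_cast h)
    exact ((natOcc_sorted labels x).imp Nat.ne_of_lt)
  · refine List.Pairwise.imp ?_ (PySem.Set.nodup_ofList labels)
    intro a b hab z hza hzb
    simp only [List.mem_map] at hza hzb
    obtain ⟨k1, hk1, rfl⟩ := hza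
    obtain ⟨k2, hk2, hz⟩ := hzb
    have hkk : k2 = k1 := by exact_mod_cast hz
    subst hkk
    obtain ⟨h1, ha⟩ := natOcc_mem labels a k2 hk1
    obtain ⟨h2, hb⟩ := natOcc_mem labels b k2 hk2
    exact hab (ha.symm.trans hb)

theorem writes_pos_nat (labels : List String) :
    ∀ w ∈ writes labels, ∃ k : Nat, w.1 = (k : Int) ∧ k < labels.length := by
  intro w hw
  simp only [writes, List.mem_flatMap] at hw
  obtain ⟨x, -, hw⟩ := hw
  simp only [wlist, List.mem_map] at hw
  obtain ⟨q, hq, rfl⟩ := hw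
  obtain ⟨r, hr, rfl⟩ := (PySem.List.mem_enumerate_iff _ _ _).mp hq
  have hr' : r < (natOcc labels x).length := by simpa using hr
  refine ⟨(natOcc labels x)[r]'hr', ?_, ?_⟩
  · simp [List.getElem_map]
  · obtain ⟨hk, -⟩ := natOcc_mem labels x _ (List.getElem_mem hr')
    exact hk

theorem writes_cover (labels : List String) (j : Nat) (hj : j < labels.length) :
    ((j : Int), tagVal labels j labels[j]) ∈ writes labels := by
  set x := labels[j] with hx
  have hxmem : x ∈ PySem.Set.ofList labels := by
    rw [PySem.Set.mem_ofList]
    exact List.getElem_mem hj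
  set c := (labels.take j).count x with hc
  have hocc : (natOcc labels x)[c]? = some j := natOcc_get labels x j hj hx.symm
  have hclt : c < (natOcc labels x).length := (List.getElem?_eq_some_iff.mp hocc).1
  simp only [writes, List.mem_flatMap]
  refine ⟨x, hxmem, ?_⟩
  simp only [wlist, List.mem_map]
  refine ⟨((0 : Int) + (c : Nat), (j : Int)), ?_, ?_⟩
  · rw [PySem.List.mem_enumerate_iff]
    have hclt' : c < ((natOcc labels x).map (fun (k : Nat) => (k : Int))).length := by
      simpa using hclt
    refine ⟨c, hclt', ?_⟩
    have hval : ((natOcc labels x).map (fun (k : Nat) => (k : Int)))[c]'hclt' = (j : Int) := by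
      rw [List.getElem_map]
      have hj' : (natOcc labels x)[c]'hclt = j := by
        rw [List.getElem?_eq_getElem hclt] at hocc
        exact Option.some.inj hocc
      rw [hj']
    rw [hval]
  · show ((j : Int), if (0 : Int) + (c : Nat) = 0 then x
        else x ++ " #" ++ PySem.Int.toStr ((0 : Int) + (c : Nat) + 1))
      = ((j : Int), tagVal labels j x)
    congr 1
    unfold tagVal
    rw [← hc]
    by_cases h0 : c = 0
    · simp [h0]
    · rw [if_neg (by omega), if_neg h0]
      have harg : (0 : Int) + (c : Nat) + 1 = ((c : Nat) : Int) + 1 := by omega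
      rw [harg]

theorem b_eq_tgt (labels : List String) : dedupe_labels_py_alt labels = tgt labels := by
  rw [alt_eq_applyWrites]
  have hlen0 : (PySem.List.pyRepeat [""] (labels.length : Int)).length = labels.length := by
    rw [PySem.List.pyRepeat_singleton, List.length_replicate, Int.toNat_natCast]
  apply List.ext_getElem?
  intro j
  by_cases hj : j < labels.length
  · rw [applyWrites_mem (writes labels) _ j (tagVal labels j (labels[j]'hj))
      (writes_pos_nodup labels)
      (fun w hw => ((writes_pos_nat labels w hw).imp (fun k hk => hk.1)))
      (writes_cover labels j hj) (by rw [hlen0]; exact hj)]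
    rw [tgt, List.getElem?_mapIdx, List.getElem?_eq_getElem hj]
    rfl
  · rw [List.getElem?_eq_none (by rw [applyWrites_length, hlen0]; omega)]
    rw [List.getElem?_eq_none (by rw [tgt, List.length_mapIdx]; omega)]

-- ===== VERDICT (by name: the statement is the Claim_ definition above) =====
theorem dedupe_labels_py_spec : Claim_equal_dedupe_labels_py := by
  intro labels _
  unfold Spec_dedupe_labels_py
  rw [a_eq_tgt, b_eq_tgt]
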